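-- pv_equiv track=rewrite | github.com/Amigos-Informaticos/Loteria-Server | Model/GameMode.py | is_valid_pattern
-- ===== SOURCE A (Python) =====
-- def is_valid_pattern(pattern: str) -> bool:
-- 	response: bool = False
-- 	if len(pattern) == 25:
-- 		for mark in pattern:
-- 			if mark != '0' and mark != '1':
-- 				break
-- 		response = True
-- 	return response
-- ===== SOURCE B (Python) =====
-- def is_valid_pattern(pattern: str) -> bool:
--     return len(pattern) == 25 and all(c in "01" for c in pattern)
-- ===== Notes on version B (the rewrite author's own statement) =====
-- stated objective: simpler
-- what changed: Replaces the dead break-loop (whose result A discards, so A accepts any 25-char string) with a single guard: length check plus all(c in '01'), actually validating the characters.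
-- intended difference: On 25-character strings containing a character other than '0' or '1', A returns True (its character loop's break discards its finding and response=True is unconditional), while B returns False, which is the evident intent of a binary-pattern validator. — e.g. on is_valid_pattern("0000000000000000000000002"): A returns true, B returns false
import Mathlib
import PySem

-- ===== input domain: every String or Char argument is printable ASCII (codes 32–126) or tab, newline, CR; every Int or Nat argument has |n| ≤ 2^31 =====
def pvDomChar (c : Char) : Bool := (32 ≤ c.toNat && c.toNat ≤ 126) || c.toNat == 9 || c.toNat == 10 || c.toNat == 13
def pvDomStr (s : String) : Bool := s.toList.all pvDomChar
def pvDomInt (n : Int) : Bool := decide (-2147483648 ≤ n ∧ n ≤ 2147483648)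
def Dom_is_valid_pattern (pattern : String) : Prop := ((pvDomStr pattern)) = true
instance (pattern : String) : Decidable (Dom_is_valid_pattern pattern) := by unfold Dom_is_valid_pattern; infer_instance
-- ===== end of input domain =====

-- B replaces A's dead character loop (A accepts any 25-char string) with a real guard:
-- length 25 AND every character is '0' or '1'; the return values differ exactly on D_ below.

-- ===== PORT A =====
-- A's for-loop with break: it computes nothing observable (its result is discarded),
-- transliterated as a Unit-valued scan that stops at the first non-'0'/'1' character.
def pvLoopA : List Char → Unit
  | [] => ()
  | mark :: rest => if mark ≠ '0' ∧ mark ≠ '1' then () else pvLoopA rest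

def is_valid_pattern (pattern : String) : Bool :=
  let response : Bool := false
  if PySem.Str.len pattern = 25 then
    let _ := pvLoopA pattern.toList
    true
  else response

-- ===== PORT B =====
def is_valid_pattern_alt (pattern : String) : Bool :=
  PySem.Str.len pattern == 25 && pattern.toList.all (fun c => c == '0' || c == '1')

-- ===== PRECONDITION & SPEC =====
-- On 25-char strings containing a character other than '0'/'1', A returns True (its loop's
-- break discards the finding), while B returns False, the evident intent of the validator.
def D_is_valid_pattern (pattern : String) : Prop :=
  PySem.Str.len pattern = 25 ∧ ¬ (∀ c ∈ pattern.toList, c = '0' ∨ c = '1')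
instance (pattern : String) : Decidable (D_is_valid_pattern pattern) := by unfold D_is_valid_pattern; infer_instance

def Spec_is_valid_pattern (pattern : String) (out : Bool) : Prop :=
  ¬ D_is_valid_pattern pattern → out = is_valid_pattern_alt pattern
instance (pattern : String) (out : Bool) : Decidable (Spec_is_valid_pattern pattern out) := by unfold Spec_is_valid_pattern; infer_instance

def pvDiffWitness_is_valid_pattern : String := "0000000000000000000000002"
def pvDiffWitnessOut_is_valid_pattern : Bool × Bool := (true, false)

-- ===== CLAIM =====
def Claim_unchanged_is_valid_pattern : Prop := ∀ (pattern : String), Dom_is_valid_pattern pattern → Spec_is_valid_pattern pattern (is_valid_pattern pattern)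
def Claim_changed_is_valid_pattern : Prop := Dom_is_valid_pattern (pvDiffWitness_is_valid_pattern) ∧ D_is_valid_pattern (pvDiffWitness_is_valid_pattern) ∧ is_valid_pattern (pvDiffWitness_is_valid_pattern) = pvDiffWitnessOut_is_valid_pattern.1 ∧ is_valid_pattern_alt (pvDiffWitness_is_valid_pattern) = pvDiffWitnessOut_is_valid_pattern.2 ∧ pvDiffWitnessOut_is_valid_pattern.1 ≠ pvDiffWitnessOut_is_valid_pattern.2
def Claim_exact_is_valid_pattern : Prop := ∀ (pattern : String), Dom_is_valid_pattern pattern → D_is_valid_pattern pattern → is_valid_pattern pattern ≠ is_valid_pattern_alt pattern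

-- ===== LEMMAS AND PROOFS =====
theorem alt_true_of_len_all (pattern : String) (hlen : PySem.Str.len pattern = 25)
    (hall : ∀ c ∈ pattern.toList, c = '0' ∨ c = '1') :
    is_valid_pattern_alt pattern = true := by
  unfold is_valid_pattern_alt
  rw [Bool.and_eq_true]
  constructor
  · exact beq_iff_eq.mpr hlen
  · rw [List.all_eq_true]
    intro c hc
    rcases hall c hc with h | h <;> simp [h]

theorem alt_false_of_D (pattern : String) (hD : D_is_valid_pattern pattern) :
    is_valid_pattern_alt pattern = false := by
  obtain ⟨_, hnot⟩ := hD
  unfold is_valid_pattern_alt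
  rw [Bool.and_eq_false_iff]
  right
  rw [Bool.eq_false_iff]
  intro hall
  rw [List.all_eq_true] at hall
  exact hnot (fun c hc => by
    have := hall c hc
    rcases Bool.or_eq_true_iff.mp this with h | h
    · exact Or.inl (beq_iff_eq.mp h)
    · exact Or.inr (beq_iff_eq.mp h))

theorem A_eq_len (pattern : String) :
    is_valid_pattern pattern = decide (PySem.Str.len pattern = 25) := by
  unfold is_valid_pattern
  by_cases h : PySem.Str.len pattern = 25
  · rw [if_pos h, decide_eq_true h]
  · rw [if_neg h, decide_eq_false h]

-- ===== VERDICT =====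
theorem is_valid_pattern_spec : Claim_unchanged_is_valid_pattern := by
  intro pattern _ hnD
  rw [A_eq_len]
  by_cases hlen : PySem.Str.len pattern = 25
  · unfold D_is_valid_pattern at hnD
    push_neg at hnD
    rw [alt_true_of_len_all pattern hlen (hnD hlen), decide_eq_true hlen]
  · have h1 : (PySem.Str.len pattern == 25) = false := beq_eq_false_iff_ne.mpr hlen
    unfold is_valid_pattern_alt
    rw [h1, Bool.false_and, decide_eq_false hlen]

set_option maxRecDepth 4000 in
theorem is_valid_pattern_changed : Claim_changed_is_valid_pattern := by
  unfold Claim_changed_is_valid_pattern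
  have hD : D_is_valid_pattern pvDiffWitness_is_valid_pattern := by
    refine ⟨by decide, fun h => ?_⟩
    have h2 := h '2' (by decide)
    rcases h2 with h2 | h2 <;> exact absurd h2 (by decide)
  refine ⟨by decide, hD, ?_, ?_, by decide⟩
  · rw [A_eq_len, decide_eq_true hD.1]; rfl
  · exact alt_false_of_D _ hD

theorem is_valid_pattern_tight : Claim_exact_is_valid_pattern := by
  intro pattern _ hD
  rw [A_eq_len, alt_false_of_D pattern hD, decide_eq_true hD.1]
  decide
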